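-- pv_equiv track=rewrite | github.com/JANVI-CHATURVEDI/LEETCODE | 3215-matrix-similarity-after-cyclic-shifts/3215-matrix-similarity-after-cyclic-shifts.py | areSimilar
-- ===== SOURCE A (Python) =====
-- from typing import List
--
-- def areSimilar(mat: List[List[int]], k: int) -> bool:
--     matrix = [row[:] for row in mat]
--     for i , row in enumerate(matrix):
--         k_mod = k % len(row)
--
--         for _ in range(k_mod):
--             if i % 2 == 0:
--                 first = row.pop(0)
--                 row.append(first)
--             else:
--                 last = row.pop()
--                 row.insert(0, last)
--
--     if matrix == mat:
--         return True
--
--     return False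
-- ===== SOURCE B (Python) =====
-- from typing import List
--
-- def areSimilar(mat: List[List[int]], k: int) -> bool:
--     # A row is unchanged by a cyclic shift of s = k % n positions (left or
--     # right -- invariance is direction-independent) iff row[j] == row[(j+s) % n]
--     # for every j.  Check that pointwise, never materializing a rotated copy.
--     for row in mat:
--         n = len(row)
--         s = k % n
--         for j in range(n):
--             if row[j] != row[(j + s) % n]:
--                 return False
--     return True
-- ===== Notes on version B (the rewrite author's own statement) =====
-- stated objective: alternative
-- what changed: Instead of copying every row and rotating it element-by-element k%n times with pop/append (and a separate even/odd direction branch) and then comparing matrices, B checks the pointwise periodicity condition row[j]==row[(j+s)%n] in one pass per row with early exit, using the fact that invariance under a left shift and a right shift by the same amount coincide.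
import Mathlib
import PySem

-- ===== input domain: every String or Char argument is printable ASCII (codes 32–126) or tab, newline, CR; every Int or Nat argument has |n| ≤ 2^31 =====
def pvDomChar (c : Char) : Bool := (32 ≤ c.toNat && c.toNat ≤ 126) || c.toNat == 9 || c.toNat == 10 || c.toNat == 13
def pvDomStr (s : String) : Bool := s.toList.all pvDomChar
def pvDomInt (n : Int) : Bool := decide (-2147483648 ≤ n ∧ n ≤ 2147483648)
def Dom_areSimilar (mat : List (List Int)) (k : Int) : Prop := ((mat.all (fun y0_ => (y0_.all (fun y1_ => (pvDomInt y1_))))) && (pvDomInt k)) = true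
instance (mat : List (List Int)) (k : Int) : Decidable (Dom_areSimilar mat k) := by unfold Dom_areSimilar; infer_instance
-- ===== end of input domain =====

-- B replaces A's per-row copy-and-rotate loops (pop/append repeated k%n times, with an
-- even/odd direction branch) by a single pointwise periodicity check row[j]==row[(j+s)%n].

-- ===== PORT A =====
-- row.pop(0); row.append(first)  — one left rotation (Python raises on []; Pre_ excludes empty rows)
def pvLeftStep (r : List Int) : List Int :=
  match r with
  | [] => []
  | a :: t => t ++ [a]

-- last = row.pop(); row.insert(0, last)  — one right rotation (Python raises on [])
def pvRightStep (r : List Int) : List Int :=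
  match r.getLast? with
  | none => []
  | some last => last :: r.dropLast

-- the body of A's outer loop for the row at (0-based) index i
def pvShiftRow (i : Int) (k : Int) (row : List Int) : List Int :=
  let kmod := PySem.Int.mod k (row.length : Int)
  (List.range kmod.toNat).foldl
    (fun r _ => if PySem.Int.mod i 2 = 0 then pvLeftStep r else pvRightStep r) row

def areSimilar (mat : List (List Int)) (k : Int) : Bool :=
  let matrix := (PySem.List.enumerate mat).map (fun p => pvShiftRow p.1 k p.2)
  matrix == mat

-- ===== PORT B =====
-- inner loop of Source B: all indices are in [0, n), so row[...] is ported with pyGetD (exact for in-range indices)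
def pvRowOk (k : Int) (row : List Int) : Bool :=
  let n := row.length
  let s := PySem.Int.mod k (n : Int)
  (List.range n).all (fun j =>
    PySem.List.pyGetD row (j : Int) 0
      == PySem.List.pyGetD row (PySem.Int.mod ((j : Int) + s) (n : Int)) 0)

def areSimilar_alt (mat : List (List Int)) (k : Int) : Bool :=
  mat.all (fun row => pvRowOk k row)

-- ===== PRECONDITION & SPEC =====
-- Pre_ excludes matrices containing an empty row: there 'k % len(row)' raises
-- ZeroDivisionError in A (and in B alike).
def Pre_areSimilar (mat : List (List Int)) (k : Int) : Prop := ∀ row ∈ mat, row ≠ []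
instance (mat : List (List Int)) (k : Int) : Decidable (Pre_areSimilar mat k) := by
  unfold Pre_areSimilar; infer_instance
def pvWitness_areSimilar : List (List Int) × Int := ([[1, 2], [3, 4, 3]], 2)

def Spec_areSimilar (mat : List (List Int)) (k : Int) (out : Bool) : Prop := out = areSimilar_alt mat k
instance (mat : List (List Int)) (k : Int) (out : Bool) : Decidable (Spec_areSimilar mat k out) := by unfold Spec_areSimilar; infer_instance

-- ===== CLAIM (what is proved, stated in full; the proofs are below) =====
def Claim_equal_areSimilar : Prop := ∀ (mat : List (List Int)) (k : Int), Dom_areSimilar mat k → Pre_areSimilar mat k → Spec_areSimilar mat k (areSimilar mat k)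

-- ===== LEMMAS AND PROOFS =====

theorem pvLeftStep_eq_rotate (r : List Int) : pvLeftStep r = r.rotate 1 := by
  cases r with
  | nil => rfl
  | cons a t => simp [pvLeftStep, List.rotate_cons_succ]

theorem pvRightStep_eq_rotate (r : List Int) (h : r ≠ []) :
    pvRightStep r = r.rotate (r.length - 1) := by
  rcases List.eq_nil_or_concat r with rfl | ⟨l, b, rfl⟩
  · exact absurd rfl h
  · simp only [List.concat_eq_append, pvRightStep, List.getLast?_concat, List.dropLast_concat]
    have hlen : (l ++ [b]).length - 1 = l.length := by simp
    rw [hlen, List.rotate_eq_drop_append_take (by simp), List.drop_left, List.take_left]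
    rfl

theorem foldl_range_const {α : Type} (g : α → α) (m : Nat) (init : α) :
    (List.range m).foldl (fun r _ => g r) init = g^[m] init := by
  induction m generalizing init with
  | zero => rfl
  | succ n ih =>
    rw [List.range_succ, List.foldl_append, ih]
    simp [Function.iterate_succ_apply']

theorem iter_left (r : List Int) (m : Nat) : pvLeftStep^[m] r = r.rotate m := by
  induction m with
  | zero => simp
  | succ n ih =>
    rw [Function.iterate_succ_apply', ih, pvLeftStep_eq_rotate, List.rotate_rotate]

theorem iter_right (r : List Int) (m : Nat) (h : r ≠ []) :
    pvRightStep^[m] r = r.rotate (m * (r.length - 1)) := by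
  induction m with
  | zero => simp
  | succ n ih =>
    rw [Function.iterate_succ_apply', ih,
      pvRightStep_eq_rotate _ (by simp [← List.length_pos_iff] at h ⊢; omega),
      List.length_rotate, List.rotate_rotate, Nat.succ_mul]

theorem rotate_fixed_iff (r : List Int) (a b : Nat) (h : (a + b) % r.length = 0) :
    (r.rotate a = r ↔ r.rotate b = r) := by
  constructor
  · intro ha
    conv_lhs => rw [← ha]
    rw [List.rotate_rotate, ← List.rotate_mod, h, List.rotate_zero]
  · intro hb
    conv_lhs => rw [← hb]
    rw [List.rotate_rotate, ← List.rotate_mod, Nat.add_comm b a, h, List.rotate_zero]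

theorem rotate_eq_self_iff (r : List Int) (s : Nat) :
    r.rotate s = r ↔ ∀ j (h : j < r.length), r[j] = r[(j + s) % r.length]'(Nat.mod_lt _ (by omega)) := by
  constructor
  · intro he j hj
    have h1 : (r.rotate s)[j]? = r[j]? := by rw [he]
    rw [List.getElem?_eq_getElem (by simpa using hj), List.getElem?_eq_getElem hj,
      List.getElem_rotate r s j (by simpa using hj)] at h1
    exact (Option.some.inj h1).symm
  · intro hp
    apply List.ext_getElem (by simp)
    intro i h1 h2
    rw [List.getElem_rotate]
    exact (hp i h2).symm

theorem row_iff (i k : Int) (row : List Int) (h : row ≠ []) :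
    (pvShiftRow i k row = row) ↔ pvRowOk k row = true := by
  have hn : 0 < row.length := List.length_pos_iff.mpr h
  have hnz : (0 : Int) < (row.length : Int) := by exact_mod_cast hn
  have hmod : PySem.Int.mod k (row.length : Int) = k % (row.length : Int) :=
    PySem.Int.mod_eq_emod_of_pos hnz
  set s : Nat := (PySem.Int.mod k (row.length : Int)).toNat with hs
  have hsc : ((s : Int)) = PySem.Int.mod k (row.length : Int) := by
    rw [hs, hmod, Int.toNat_of_nonneg (Int.emod_nonneg _ (by omega))]
  -- B's check in terms of getElem
  have hB : (pvRowOk k row = true) ↔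
      ∀ j (hj : j < row.length), row[j] = row[(j + s) % row.length]'(Nat.mod_lt _ (by omega)) := by
    unfold pvRowOk
    simp only [List.all_eq_true, List.mem_range, beq_iff_eq]
    have hidx : ∀ j : Nat, j < row.length →
        PySem.Int.mod ((j : Int) + PySem.Int.mod k (row.length : Int)) (row.length : Int)
          = (((j + s) % row.length : Nat) : Int) := by
      intro j hj
      rw [PySem.Int.mod_eq_emod_of_pos hnz, ← hsc]
      push_cast
      rfl
    constructor
    · intro hall j hj
      have := hall j hj
      rw [hidx j hj, PySem.List.pyGetD_natCast, PySem.List.pyGetD_natCast,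
        List.getD_eq_getElem _ _ hj, List.getD_eq_getElem _ _ (Nat.mod_lt _ (by omega))] at this
      exact this
    · intro hp j hj
      rw [hidx j hj, PySem.List.pyGetD_natCast, PySem.List.pyGetD_natCast,
        List.getD_eq_getElem _ _ hj, List.getD_eq_getElem _ _ (Nat.mod_lt _ (by omega))]
      exact hp j hj
  rw [hB, ← rotate_eq_self_iff]
  unfold pvShiftRow
  simp only
  rw [foldl_range_const]
  by_cases hpar : PySem.Int.mod i 2 = 0
  · simp only [hpar, if_true]
    have : (fun r => pvLeftStep r) = pvLeftStep := rfl
    rw [this, iter_left]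
  · simp only [hpar, if_false]
    have : (fun r => pvRightStep r) = pvRightStep := rfl
    rw [this, iter_right _ _ h]
    exact rotate_fixed_iff row (s * (row.length - 1)) s
      (by
        have hsn : s ≤ s * row.length := Nat.le_mul_of_pos_right s hn
        have heq : s * (row.length - 1) + s = s * row.length := by
          rw [Nat.mul_sub, Nat.mul_one]; omega
        rw [heq, Nat.mul_mod_left])

theorem matrix_iff (k : Int) (mat : List (List Int)) (st : Int)
    (h : ∀ row ∈ mat, row ≠ []) :
    ((PySem.List.enumerate mat st).map (fun p => pvShiftRow p.1 k p.2) = mat)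
      ↔ (∀ row ∈ mat, pvRowOk k row = true) := by
  induction mat generalizing st with
  | nil => simp [PySem.List.enumerate_nil]
  | cons r t ih =>
    rw [PySem.List.enumerate_cons]
    simp only [List.map_cons, List.cons.injEq, List.forall_mem_cons]
    rw [row_iff st k r (h r (List.mem_cons_self)),
      ih (st + 1) (fun row hm => h row (List.mem_cons_of_mem _ hm))]

-- ===== VERDICT (by name: the statement is the Claim_ definition above) =====
theorem areSimilar_spec : Claim_equal_areSimilar := by
  intro mat k _ hpre
  unfold Spec_areSimilar areSimilar areSimilar_alt
  rw [Bool.eq_iff_iff]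
  simp only [beq_iff_eq, List.all_eq_true]
  exact matrix_iff k mat 0 hpre
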